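-- pv_equiv track=rewrite | github.com/Jane-Zhai/target_offer | eg_44_digitAtIndex.py | digitAtIndex
-- ===== SOURCE A (Python) =====
-- def digitAtIndex(index):
--     if index < 0:
--         return -1
--     digit = 1
--     while True:
--         numbers = countNum(digit)
--         if index < numbers * digit:
--             return findDigit(index, digit)
--         index -= digit * numbers
--         digit += 1
--
-- def countNum(digit):
--     if digit == 1:
--         return 10
--     count = 10 ** (digit-1)
--     return 9 * count
--
-- def findDigit(index, digit):
--     if digit == 1:
--         begin = 0
--     else:
--         begin = 10 ** (digit-1)
--
--     number = begin + index//digit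
--     indexFromRight = digit - index%digit
--     for i in range(1,indexFromRight):
--         number//=10
--     return number % 10
-- ===== SOURCE B (Python) =====
-- def digitAtIndex(index):
--     if index < 0:
--         return -1
--     # binary search the least n whose digits-used-through count exceeds index
--     lo, hi = 0, index + 1
--     while lo < hi:
--         mid = (lo + hi) // 2
--         if digitsUsedThrough(mid) > index:
--             hi = mid
--         else:
--             lo = mid + 1
--     return lo // 10 ** (digitsUsedThrough(lo) - 1 - index) % 10
--
--
-- def digitsUsedThrough(n):
--     # total characters of the concatenation '0' + '1' + ... + str(n), in closed form
--     width, power = 1, 10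
--     while power <= n:
--         width += 1
--         power *= 10
--     return (n + 1) * width - (10 ** width - 1) // 9 + 1
-- ===== Notes on version B (the rewrite author's own statement) =====
-- stated objective: alternative
-- what changed: Replaces A's width-by-width block-skipping loop (skip a whole block of equal-width numbers per pass, then extract the digit by a repeated-division loop) with a binary search for the number containing the position, keyed by a closed-form repunit-based count of the digits consumed through each number.
import Mathlib
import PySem

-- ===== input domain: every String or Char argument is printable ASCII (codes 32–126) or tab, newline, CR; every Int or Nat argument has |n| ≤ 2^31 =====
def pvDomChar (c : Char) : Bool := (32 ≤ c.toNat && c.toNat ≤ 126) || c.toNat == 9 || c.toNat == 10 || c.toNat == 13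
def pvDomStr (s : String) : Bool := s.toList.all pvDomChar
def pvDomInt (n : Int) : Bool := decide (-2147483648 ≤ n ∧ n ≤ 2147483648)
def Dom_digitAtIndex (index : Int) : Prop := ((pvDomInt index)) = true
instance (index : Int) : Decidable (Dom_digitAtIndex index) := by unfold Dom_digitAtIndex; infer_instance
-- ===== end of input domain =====

-- B replaces A's width-by-width block skipping with a binary search for the number holding the
-- position, using a closed-form count of digits consumed through a number (alternative algorithm).

-- ===== PORT A =====
-- Python: 10 ** (digit-1); exponent ported as (digit-1).toNat — exact for digit ≥ 1, the only values reached.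
def countNumA (digit : Int) : Int :=
  if digit = 1 then 10 else 9 * 10 ^ (digit - 1).toNat

def findDigitA (index digit : Int) : Int :=
  let begin_ : Int := if digit = 1 then 0 else 10 ^ (digit - 1).toNat
  let number := begin_ + PySem.Int.floordiv index digit
  let indexFromRight := digit - PySem.Int.mod index digit
  let number := (PySem.List.pyRange 1 indexFromRight 1).foldl
    (fun acc _ => PySem.Int.floordiv acc 10) number
  PySem.Int.mod number 10

-- the 'while True' loop of A; fuel 64 is ample (digit grows each pass, ≤ 11 passes on Dom)
def loopA : Nat → Int → Int → Int
  | 0, _, _ => 0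
  | f+1, index, digit =>
    let numbers := countNumA digit
    if index < numbers * digit then findDigitA index digit
    else loopA f (index - digit * numbers) (digit + 1)

def digitAtIndex (index : Int) : Int :=
  if index < 0 then -1 else loopA 64 index 1

-- ===== PORT B =====
-- the 'while power <= n' loop of digitsUsedThrough; fuel 64 is ample (power ×10 each pass)
def digitsUsedThroughLoop : Nat → Int → Int → Int → Int
  | 0, _, width, _ => width
  | f+1, n, width, power =>
    if power ≤ n then digitsUsedThroughLoop f n (width + 1) (power * 10) else width

-- Python: 10 ** width with width ≥ 1 always; exponent ported as .toNat (exact there)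
def digitsUsedThrough (n : Int) : Int :=
  let width := digitsUsedThroughLoop 64 n 1 10
  (n + 1) * width - PySem.Int.floordiv (10 ^ width.toNat - 1) 9 + 1

-- the 'while lo < hi' binary-search loop; fuel 64 is ample (the interval halves each pass)
def bsLoop : Nat → Int → Int → Int → Int
  | 0, _, lo, _ => lo
  | f+1, index, lo, hi =>
    if lo < hi then
      let mid := PySem.Int.floordiv (lo + hi) 2
      if digitsUsedThrough mid > index then bsLoop f index lo mid
      else bsLoop f index (mid + 1) hi
    else lo

def digitAtIndex_alt (index : Int) : Int :=
  if index < 0 then -1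
  else
    let lo := bsLoop 64 index 0 (index + 1)
    PySem.Int.mod (PySem.Int.floordiv lo (10 ^ (digitsUsedThrough lo - 1 - index).toNat)) 10

-- ===== PRECONDITION & SPEC =====
def Spec_digitAtIndex (index : Int) (out : Int) : Prop := out = digitAtIndex_alt index
instance (index : Int) (out : Int) : Decidable (Spec_digitAtIndex index out) := by unfold Spec_digitAtIndex; infer_instance

-- ===== CLAIM (what is proved, stated in full; the proofs are below) =====
def Claim_equal_digitAtIndex : Prop := ∀ (index : Int), Dom_digitAtIndex index → Spec_digitAtIndex index (digitAtIndex index)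

-- ===== LEMMAS AND PROOFS =====

-- repunit: rep k = (10^k - 1)/9, the subtrahend in B's closed form
def rep : Nat → Int
  | 0 => 0
  | k+1 => 10 * rep k + 1

theorem rep_mul (k : Nat) : 9 * rep k = 10 ^ k - 1 := by
  induction k with
  | zero => simp [rep]
  | succ k ih => rw [rep, pow_succ]; ring_nf; ring_nf at ih; omega

-- start of the block of (e+1)-digit numbers in the sequence
def sB : Nat → Int := fun e => if e = 0 then 0 else (10:Int) ^ e

-- digits consumed by all blocks of width ≤ e
def cumC : Nat → Int
  | 0 => 0
  | e+1 => cumC e + ((10:Int) ^ (e+1) - sB e) * ((e:Int) + 1)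

-- the digit both programs return: position i inside the block starting at number n of width w
def blockDigit (i n w : Int) : Int :=
  PySem.Int.mod (PySem.Int.floordiv (n + PySem.Int.floordiv i w)
    (10 ^ (w - 1 - PySem.Int.mod i w).toNat)) 10

theorem fold10 (l : List Int) (x : Int) :
    l.foldl (fun acc _ => PySem.Int.floordiv acc 10) x = PySem.Int.floordiv x (10 ^ l.length) := by
  induction l generalizing x with
  | nil => simp [PySem.Int.floordiv]
  | cons a t ih =>
    simp only [List.foldl_cons, ih, List.length_cons]
    rw [PySem.Int.floordiv_eq_ediv_of_pos (by positivity),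
        PySem.Int.floordiv_eq_ediv_of_pos (by positivity),
        PySem.Int.floordiv_eq_ediv_of_pos (by positivity),
        Int.ediv_ediv_of_nonneg (by norm_num), pow_succ, mul_comm]

theorem findDigit_eq (e : Nat) (i : Int) :
    findDigitA i ((e:Int)+1) = blockDigit i (sB e) ((e:Int)+1) := by
  have hm0 : 0 ≤ PySem.Int.mod i ((e:Int)+1) := PySem.Int.mod_nonneg _ (by omega)
  have hmlt : PySem.Int.mod i ((e:Int)+1) < (e:Int)+1 := PySem.Int.mod_lt _ (by omega)
  have hd1 : (((e:Int) + 1 = 1)) ↔ e = 0 := by omega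
  have htn : (((e:Int) + 1 - 1).toNat) = e := by omega
  simp only [findDigitA, blockDigit, sB, hd1, htn]
  rw [fold10, PySem.List.length_pyRange_one]
  congr 3
  omega

theorem usedLoop_eq : ∀ (d f : Nat) (n w p : Int), d < f → 0 < p → n < 10 ^ d * p →
    (∀ j : Nat, j < d → 10 ^ j * p ≤ n) → digitsUsedThroughLoop f n w p = w + d := by
  intro d
  induction d with
  | zero =>
    intro f n w p hf hp hlt _
    cases f with
    | zero => omega
    | succ f =>
      have hlt' : n < p := by simpa using hlt
      simp only [digitsUsedThroughLoop, if_neg (by omega : ¬ p ≤ n)]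
      omega
  | succ d ih =>
    intro f n w p hf hp hlt hge
    cases f with
    | zero => omega
    | succ f =>
      have h0 : p ≤ n := by simpa using hge 0 (by omega)
      simp only [digitsUsedThroughLoop, if_pos h0]
      rw [ih f n (w+1) (p*10) (by omega) (by omega) (by rw [show 10^d * (p*10) = 10^(d+1) * p by ring]; exact hlt)
        (fun j hj => by rw [show 10^j * (p*10) = 10^(j+1) * p by ring]; exact hge (j+1) (by omega))]
      omega

theorem floordiv_rep (k : Nat) : PySem.Int.floordiv (10 ^ k - 1) 9 = rep k := by
  rw [PySem.Int.floordiv_eq_ediv_of_pos (by norm_num), ← rep_mul k]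
  exact Int.mul_ediv_cancel_left _ (by norm_num)

theorem used_formula (e : Nat) (n : Int) (he : e ≤ 20) (h1 : sB e ≤ n)
    (h2 : n < 10 ^ (e+1)) (_h0 : 0 ≤ n) :
    digitsUsedThrough n = (n + 1) * ((e:Int) + 1) - rep (e+1) + 1 := by
  have hw : digitsUsedThroughLoop 64 n 1 10 = 1 + (e : Int) := by
    apply usedLoop_eq e 64 n 1 10 (by omega) (by norm_num)
    · rw [show (10:Int)^e * 10 = 10^(e+1) by rw [pow_succ]]; exact h2
    · intro j hj
      have he1 : e ≠ 0 := by omega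
      have : (10:Int)^(j+1) ≤ 10^e := pow_le_pow_right₀ (by norm_num) (by omega)
      have hs : sB e = 10^e := by simp [sB, he1]
      rw [show (10:Int)^j * 10 = 10^(j+1) by rw [pow_succ]]
      omega
  simp only [digitsUsedThrough, hw]
  rw [show ((1:Int) + (e:Int)).toNat = e + 1 by omega, floordiv_rep]
  ring

theorem cumC_eq (e : Nat) : cumC e = sB e * ((e:Int) + 1) - rep (e+1) + 1 := by
  induction e with
  | zero => simp [cumC, sB, rep]
  | succ e ih =>
    have h9 := rep_mul (e+1)
    have hrep : rep (e+1+1) = 10 * rep (e+1) + 1 := rfl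
    have hC : cumC (e+1) = cumC e + ((10:Int) ^ (e+1) - sB e) * ((e:Int) + 1) := rfl
    have hs : sB (e+1) = (10:Int)^(e+1) := by simp [sB]
    rw [hC, ih, hs, hrep]
    push_cast
    linear_combination h9

theorem used_eq_cum (e : Nat) (n : Int) (he : e ≤ 20) (h1 : sB e ≤ n)
    (h2 : n < 10 ^ (e+1)) (h0 : 0 ≤ n) :
    digitsUsedThrough n = cumC e + (n - sB e + 1) * ((e:Int) + 1) := by
  rw [used_formula e n he h1 h2 h0, cumC_eq]
  ring

theorem exists_block : ∀ (K : Nat) (n : Int), 0 ≤ n → n < 10 ^ (K+1) →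
    ∃ e : Nat, e ≤ K ∧ sB e ≤ n ∧ n < 10 ^ (e+1) := by
  intro K
  induction K with
  | zero => intro n h0 h1; exact ⟨0, le_refl _, by simp [sB]; omega, h1⟩
  | succ K ih =>
    intro n h0 h1
    by_cases h : n < 10 ^ (K+1)
    · obtain ⟨e, he, hs, hb⟩ := ih n h0 h
      exact ⟨e, by omega, hs, hb⟩
    · exact ⟨K+1, le_refl _, by simp [sB]; omega, h1⟩

theorem used_step (n : Int) (h0 : 0 ≤ n) (hb : n < 10 ^ 11) :
    digitsUsedThrough n + 1 ≤ digitsUsedThrough (n + 1) := by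
  obtain ⟨e, he, hs, hlt⟩ := exists_block 10 n h0 hb
  by_cases hsame : n + 1 < 10 ^ (e+1)
  · rw [used_formula e n (by omega) hs hlt h0,
      used_formula e (n+1) (by omega) (by omega) hsame (by omega)]
    have : ((n+1)+1) * ((e:Int)+1) - (n+1) * ((e:Int)+1) = (e:Int)+1 := by ring
    omega
  · have hn1 : n + 1 = 10 ^ (e+1) := by omega
    have hs1 : sB (e+1) = (10:Int)^(e+1) := by simp [sB]
    have hlt1 : n + 1 < 10 ^ (e+1+1) := by
      have : (10:Int)^(e+1) < 10^(e+2) := by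
        have := pow_lt_pow_right₀ (by norm_num : (1:Int) < 10) (by omega : e+1 < e+2)
        exact this
      omega
    rw [used_formula e n (by omega) hs hlt h0,
      used_formula (e+1) (n+1) (by omega) (by omega) hlt1 (by omega)]
    have h9 := rep_mul (e+1)
    have hrep : rep (e+1+1) = 10 * rep (e+1) + 1 := rfl
    have hkey : ((n+1)+1) * ((e:Int)+1+1) - rep (e+1+1) - ((n+1) * ((e:Int)+1) - rep (e+1))
        = (e:Int) + 2 := by
      rw [hrep]
      linear_combination hn1 - h9
    push_cast at hkey ⊢
    omega

theorem used_mono_nat : ∀ (k : Nat) (a : Int), 0 ≤ a → a + (k:Int) ≤ 10 ^ 11 →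
    digitsUsedThrough a ≤ digitsUsedThrough (a + k) := by
  intro k
  induction k with
  | zero => intro a _ _; simp
  | succ k ih =>
    intro a h0 hb
    have h1 := ih a h0 (by push_cast at hb ⊢; omega)
    have h2 := used_step (a + k) (by positivity) (by push_cast at hb ⊢; omega)
    push_cast at hb ⊢
    calc digitsUsedThrough a ≤ digitsUsedThrough (a + k) := h1
      _ ≤ digitsUsedThrough (a + k) + 1 := by omega
      _ ≤ digitsUsedThrough (a + k + 1) := used_step _ (by positivity) (by omega)
      _ = digitsUsedThrough (a + (k + 1)) := by ring_nf

theorem used_mono (a b : Int) (h0 : 0 ≤ a) (hab : a ≤ b) (hb : b ≤ 10 ^ 11) :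
    digitsUsedThrough a ≤ digitsUsedThrough b := by
  have h := used_mono_nat (b - a).toNat a h0 (by omega)
  rwa [show a + ((b - a).toNat : Int) = b by omega] at h

theorem used_lb : ∀ (k : Nat), (k:Int) ≤ 10 ^ 11 → (k:Int) + 1 ≤ digitsUsedThrough k := by
  intro k
  induction k with
  | zero => intro _; decide
  | succ k ih =>
    intro hb
    have h1 := ih (by push_cast at hb ⊢; omega)
    have h2 := used_step k (by positivity) (by push_cast at hb ⊢; omega)
    push_cast at hb ⊢
    omega

theorem bs_correct : ∀ (f : Nat) (t lo hi : Int), 0 ≤ lo → lo ≤ hi → hi ≤ t + 1 →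
    hi - lo < 2 ^ f →
    (lo = 0 ∨ digitsUsedThrough (lo - 1) ≤ t) → t < digitsUsedThrough hi →
    0 ≤ bsLoop f t lo hi ∧ bsLoop f t lo hi ≤ t + 1 ∧
      t < digitsUsedThrough (bsLoop f t lo hi) ∧
      (bsLoop f t lo hi = 0 ∨ digitsUsedThrough (bsLoop f t lo hi - 1) ≤ t) := by
  intro f
  induction f with
  | zero =>
    intro t lo hi h0 hle hhi hf hinv hused
    have : lo = hi := by omega
    subst this
    rw [show bsLoop 0 t lo lo = lo from rfl]
    exact ⟨h0, by omega, hused, hinv⟩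
  | succ f ih =>
    intro t lo hi h0 hle hhi hf hinv hused
    by_cases hlt : lo < hi
    · have hmid : PySem.Int.floordiv (lo + hi) 2 * 2 ≤ lo + hi ∧
          lo + hi < (PySem.Int.floordiv (lo + hi) 2 + 1) * 2 :=
        (PySem.Int.floordiv_eq_iff_of_pos (by norm_num)).mp rfl
      set mid := PySem.Int.floordiv (lo + hi) 2 with hm
      have hpow : (2:Int) ^ (f+1) = 2 ^ f + 2 ^ f := by ring
      simp only [bsLoop, if_pos hlt, ← hm]
      by_cases hc : digitsUsedThrough mid > t
      · rw [if_pos hc]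
        exact ih t lo mid h0 (by omega) (by omega) (by omega) hinv hc
      · rw [if_neg hc]
        exact ih t (mid+1) hi (by omega) (by omega) hhi (by omega)
          (Or.inr (by simpa using (by omega : digitsUsedThrough mid ≤ t))) hused
    · have : lo = hi := by omega
      subst this
      simp only [bsLoop, if_neg hlt]
      exact ⟨h0, by omega, hused, hinv⟩

theorem main_A : ∀ (fA : Nat) (e : Nat) (i : Int), 0 ≤ i → i ≤ 2147483648 → e ≤ 10 →
    11 ≤ e + fA →
    ∃ e' : Nat, e ≤ e' ∧ e' ≤ 10 ∧ cumC e' - cumC e ≤ i ∧ i < cumC (e'+1) - cumC e ∧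
      loopA fA i ((e:Int)+1) = blockDigit (i - (cumC e' - cumC e)) (sB e') ((e':Int)+1) := by
  intro fA
  induction fA with
  | zero => intro e i _ _ h1 h2; omega
  | succ fA ih =>
    intro e i hi hicap he hfa
    have hd1 : ((e:Int) + 1 = 1) ↔ e = 0 := by omega
    have htn : (((e:Int) + 1 - 1).toNat) = e := by omega
    have hcnt : countNumA ((e:Int)+1) = 10 ^ (e+1) - sB e := by
      by_cases h0 : e = 0
      · subst h0; simp [countNumA, sB]
      · rw [countNumA, if_neg (by omega), htn]
        simp [sB, h0, pow_succ]; ring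
    have hC : cumC (e+1) = cumC e + ((10:Int) ^ (e+1) - sB e) * ((e:Int) + 1) := rfl
    have hs0 : 0 ≤ sB e := by simp only [sB]; split <;> positivity
    have hsb : sB e < 10 ^ (e+1) := by
      simp only [sB]; split
      · positivity
      · rw [pow_succ]; nlinarith [pow_pos (by norm_num : (0:Int) < 10) e]
    simp only [loopA, hcnt]
    by_cases hcase : i < (10 ^ (e+1) - sB e) * ((e:Int)+1)
    · rw [if_pos hcase]
      exact ⟨e, le_refl _, he, by omega, by omega,
        by rw [show i - (cumC e - cumC e) = i by ring, findDigit_eq e i]⟩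
    · rw [if_neg hcase]
      push Not at hcase
      have he9 : e ≤ 9 := by
        by_contra h
        have he10 : e = 10 := by omega
        subst he10
        have hsB : sB 10 = (10:Int)^10 := by simp [sB]
        rw [hsB] at hcase
        norm_num at hcase
        omega
      have hbpos : 0 < ((e:Int)+1) * (10 ^ (e+1) - sB e) := mul_pos (by omega) (by omega)
      set i' := i - ((e:Int)+1) * (10 ^ (e+1) - sB e) with hi'
      have hblock : ((10:Int) ^ (e+1) - sB e) * ((e:Int)+1) = ((e:Int)+1) * (10 ^ (e+1) - sB e) := by ring
      obtain ⟨e', h1, h2, h3, h4, h5⟩ := ih (e+1) i' (by omega) (by omega) (by omega) (by omega)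
      have hcast : ((e:Int)+1)+1 = (((e+1:Nat)):Int)+1 := by push_cast; ring
      refine ⟨e', by omega, h2, by omega, by omega, ?_⟩
      rw [hcast, h5]
      congr 1
      omega

theorem sB_nonneg (e : Nat) : 0 ≤ sB e := by
  simp only [sB]; split <;> positivity

theorem sB_lt (e : Nat) : sB e < 10 ^ (e+1) := by
  simp only [sB]; split
  · positivity
  · rw [pow_succ]; nlinarith [pow_pos (by norm_num : (0:Int) < 10) e]

-- ===== VERDICT (by name: the statement is the Claim_ definition above) =====
theorem digitAtIndex_spec : Claim_equal_digitAtIndex := by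
  intro t hdom
  unfold Spec_digitAtIndex digitAtIndex digitAtIndex_alt
  by_cases hneg : t < 0
  · simp [hneg]
  · push Not at hneg
    rw [if_neg (by omega), if_neg (by omega)]
    have hcap : t ≤ 2147483648 := by
      simp [Dom_digitAtIndex, pvDomInt] at hdom; omega
    obtain ⟨e', _, he10, hC1, hC2, hA⟩ := main_A 64 0 t hneg hcap (by omega) (by omega)
    have hc0 : cumC 0 = 0 := rfl
    rw [hc0] at hC1 hC2 hA
    norm_num at hA
    set i := t - cumC e' with hidef
    set w : Int := (e':Int) + 1 with hwdef
    have hw1 : 0 < w := by omega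
    have hCrec : cumC (e'+1) = cumC e' + ((10:Int) ^ (e'+1) - sB e') * w := rfl
    have hs0 := sB_nonneg e'
    have hslt := sB_lt e'
    set q := PySem.Int.floordiv i w with hqdef
    set r := PySem.Int.mod i w with hrdef
    have hi0 : 0 ≤ i := by omega
    have hq0 : 0 ≤ q := by
      rw [hqdef]; exact (PySem.Int.le_floordiv_iff_mul_le hw1).mpr (by omega)
    have hqlt : q < 10 ^ (e'+1) - sB e' := by
      rw [hqdef]
      exact (PySem.Int.floordiv_lt_iff_lt_mul hw1).mpr (by omega)
    have hr0 : 0 ≤ r := PySem.Int.mod_nonneg _ (by omega)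
    have hrlt : r < w := PySem.Int.mod_lt _ (by omega)
    have hsum : q * w + r = i := PySem.Int.floordiv_mul_add_mod i w
    set N := sB e' + q with hNdef
    have hNlt : N < 10 ^ (e'+1) := by omega
    have husedN : digitsUsedThrough N = cumC e' + (q + 1) * w := by
      rw [used_eq_cum e' N (by omega) (by omega) hNlt (by omega),
        show N - sB e' + 1 = q + 1 by omega, ← hwdef]
    have hqw : (q + 1) * w = q * w + w := by ring
    have hNgt : t < digitsUsedThrough N := by rw [husedN]; omega
    have hNle : N = 0 ∨ digitsUsedThrough (N - 1) ≤ t := by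
      by_cases hN0 : N = 0
      · exact Or.inl hN0
      · right
        by_cases hq1 : 1 ≤ q
        · rw [used_eq_cum e' (N-1) (by omega) (by omega) (by omega) (by omega),
            show N - 1 - sB e' + 1 = q by omega, ← hwdef]
          omega
        · have hqz : q = 0 := by omega
          have he'0 : e' ≠ 0 := by
            intro h; rw [h] at hNdef; simp [sB] at hNdef; omega
          obtain ⟨e'', rfl⟩ : ∃ e'', e' = e'' + 1 := ⟨e' - 1, by omega⟩
          have hsB' : sB (e''+1) = (10:Int) ^ (e''+1) := by simp [sB]
          have hs0' := sB_nonneg e''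
          have hslt' := sB_lt e''
          have hNv : N = (10:Int) ^ (e''+1) := by omega
          rw [used_eq_cum e'' (N-1) (by omega) (by omega) (by omega) (by omega),
            show N - 1 - sB e'' + 1 = (10:Int) ^ (e''+1) - sB e'' by omega]
          have hCrec' : cumC (e''+1) = cumC e'' + ((10:Int) ^ (e''+1) - sB e'') * ((e'':Int) + 1) := rfl
          omega
    have hpow11 : (10:Int) ^ 11 = 100000000000 := by norm_num
    have hNcap : N < 10 ^ 11 := by
      have : (10:Int) ^ (e'+1) ≤ 10 ^ 11 := pow_le_pow_right₀ (by norm_num) (by omega)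
      omega
    have hub := used_lb (t+1).toNat (by rw [Int.toNat_of_nonneg (by omega)]; omega)
    rw [Int.toNat_of_nonneg (by omega : (0:Int) ≤ t + 1)] at hub
    have hbs := bs_correct 64 t 0 (t+1) (le_refl 0) (by omega) (le_refl _)
      (by
        have h64 : (2:Int) ^ 64 = 18446744073709551616 := by norm_num
        omega)
      (Or.inl rfl) (by omega)
    set lo := bsLoop 64 t 0 (t+1) with hlodef
    obtain ⟨hlo0, hlocap, hlogt, hlole⟩ := hbs
    have hloN : lo = N := by
      rcases lt_trichotomy lo N with h | h | h
      · exfalso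
        rcases hNle with h0 | hle'
        · omega
        · have hm := used_mono lo (N-1) hlo0 (by omega) (by omega)
          omega
      · exact h
      · exfalso
        rcases hlole with h0 | hle'
        · omega
        · have hm := used_mono N (lo - 1) (by omega) (by omega) (by omega)
          omega
    show loopA 64 t 1 = PySem.Int.mod (PySem.Int.floordiv lo
      (10 ^ (digitsUsedThrough lo - 1 - t).toNat)) 10
    rw [hA, hloN, husedN, blockDigit,
      show cumC e' + (q + 1) * w - 1 - t = w - 1 - r by omega]
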